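-- pv_equiv track=rewrite | github.com/stephenrocksolid/sgr2 | imports/utils.py | suggest_engine_field_mappings
-- ===== SOURCE A (Python) =====
-- def get_engine_field_aliases():
--     """Get field aliases for engine import mapping."""
--     return {
--         'serial_number': ['s/n', 'serial', 'serial number', 'sn'],
--         'di': ['di', 'direct injection'],
--         'idi': ['idi', 'indirect injection'],
--         'common_rail': ['common rail', 'common-rail', 'cr'],
--         'two_valve': ['2v', '2 valve', 'two valve'],
--         'four_valve': ['4v', '4 valve', 'four valve'],
--         'five_valve': ['5v', '5 valve', 'five valve'],
--         'casting_comments': ['casting # comments', 'casting comments', 'casting notes'],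
--     }
--
-- def fuzzy_match_header(header, target_field, aliases):
--     """Fuzzy match a header to a target field using aliases."""
--     header_lower = header.lower().strip()
--
--     # Direct match
--     if header_lower == target_field.lower():
--         return True
--
--     # Check aliases
--     if target_field in aliases:
--         for alias in aliases[target_field]:
--             if header_lower == alias.lower():
--                 return True
--             # Handle punctuation variations
--             alias_clean = alias.lower().replace('#', '').replace('-', ' ').replace('_', ' ')
--             header_clean = header_lower.replace('#', '').replace('-', ' ').replace('_', ' ')
--             if alias_clean == header_clean:
--                 return True
--
--     return False
--
-- def suggest_engine_field_mappings(headers):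
--     """Suggest field mappings for engine import based on header analysis."""
--     aliases = get_engine_field_aliases()
--     suggestions = {}
--
--     for header in headers:
--         for field, field_aliases in aliases.items():
--             if fuzzy_match_header(header, field, aliases):
--                 suggestions[field] = header
--                 break
--
--     return suggestions
-- ===== SOURCE B (Python) =====
-- def get_engine_field_aliases():
--     """Get field aliases for engine import mapping."""
--     return {
--         'serial_number': ['s/n', 'serial', 'serial number', 'sn'],
--         'di': ['di', 'direct injection'],
--         'idi': ['idi', 'indirect injection'],
--         'common_rail': ['common rail', 'common-rail', 'cr'],
--         'two_valve': ['2v', '2 valve', 'two valve'],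
--         'four_valve': ['4v', '4 valve', 'four valve'],
--         'five_valve': ['5v', '5 valve', 'five valve'],
--         'casting_comments': ['casting # comments', 'casting comments', 'casting notes'],
--     }
--
-- def _clean(s):
--     return s.replace('#', '').replace('-', ' ').replace('_', ' ')
--
-- def suggest_engine_field_mappings(headers):
--     """Suggest field mappings via one precomputed lookup table instead of a nested scan."""
--     aliases = get_engine_field_aliases()
--     raw = {}        # exact lowered form -> (field index, field)
--     cleaned = {}    # punctuation-cleaned alias form -> (field index, field)
--     for i, (field, field_aliases) in enumerate(aliases.items()):
--         raw.setdefault(field.lower(), (i, field))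
--         for a in field_aliases:
--             al = a.lower()
--             raw.setdefault(al, (i, field))
--             cleaned.setdefault(_clean(al), (i, field))
--     suggestions = {}
--     for header in headers:
--         hl = header.lower().strip()
--         best = None
--         for c in (raw.get(hl), cleaned.get(_clean(hl))):
--             if c is not None and (best is None or c[0] < best[0]):
--                 best = c
--         if best is not None:
--             suggestions[best[1]] = header
--     return suggestions
-- ===== Notes on version B (the rewrite author's own statement) =====
-- stated objective: faster
-- what changed: Replaces the per-header nested scan over all fields and their aliases with two lookup tables (normalized string -> earliest field) built once via setdefault, then a constant number of dict lookups per header combined by minimal field index.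
import Mathlib
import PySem

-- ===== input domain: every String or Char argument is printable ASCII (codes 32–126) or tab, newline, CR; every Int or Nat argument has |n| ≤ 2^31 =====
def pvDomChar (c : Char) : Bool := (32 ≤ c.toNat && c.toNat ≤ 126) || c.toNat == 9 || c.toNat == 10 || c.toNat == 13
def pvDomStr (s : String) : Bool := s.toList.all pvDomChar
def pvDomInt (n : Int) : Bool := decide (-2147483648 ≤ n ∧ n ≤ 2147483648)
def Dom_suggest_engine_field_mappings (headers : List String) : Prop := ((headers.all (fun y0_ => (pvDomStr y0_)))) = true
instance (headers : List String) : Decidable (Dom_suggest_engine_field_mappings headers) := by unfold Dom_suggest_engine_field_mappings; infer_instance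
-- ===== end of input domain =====

-- B builds two normalized-string -> (field index, field) tables once and does two lookups per header (combined by least field index) instead of A's nested scan over all fields and aliases; objective: faster (constant factor).

-- ===== PORT A =====
-- shared module helper: get_engine_field_aliases()
def engineFieldAliases : PySem.Dict String (List String) :=
  PySem.Dict.ofList [
    ("serial_number", ["s/n", "serial", "serial number", "sn"]),
    ("di", ["di", "direct injection"]),
    ("idi", ["idi", "indirect injection"]),
    ("common_rail", ["common rail", "common-rail", "cr"]),
    ("two_valve", ["2v", "2 valve", "two valve"]),
    ("four_valve", ["4v", "4 valve", "four valve"]),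
    ("five_valve", ["5v", "5 valve", "five valve"]),
    ("casting_comments", ["casting # comments", "casting comments", "casting notes"])]

-- the 'for anAlias in aliases[target_field]' loop of fuzzy_match_header (returns at first match)
def fuzzyAliasLoop (header_lower : String) : List String → Bool
  | [] => false
  | anAlias :: rest =>
    if header_lower == PySem.Str.lower anAlias then true
    else
      let aliasClean := PySem.Str.replace (PySem.Str.replace (PySem.Str.replace (PySem.Str.lower anAlias) "#" "") "-" " ") "_" " "
      let headerClean := PySem.Str.replace (PySem.Str.replace (PySem.Str.replace header_lower "#" "") "-" " ") "_" " "
      if aliasClean == headerClean then true else fuzzyAliasLoop header_lower rest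

def fuzzy_match_header (header target_field : String) (aliases : PySem.Dict String (List String)) : Bool :=
  let header_lower := PySem.Str.strip (PySem.Str.lower header)
  if header_lower == PySem.Str.lower target_field then true
  else if aliases.contains target_field then
    fuzzyAliasLoop header_lower (aliases.getD target_field [])
  else false

-- the 'for field, field_aliases in aliases.items()' loop with break
def suggestFieldLoop (header : String) (aliases : PySem.Dict String (List String))
    (suggestions : PySem.Dict String String) : List (String × List String) → PySem.Dict String String
  | [] => suggestions
  | (field, _) :: rest =>
    if fuzzy_match_header header field aliases then suggestions.insert field header
    else suggestFieldLoop header aliases suggestions rest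

def suggest_engine_field_mappings (headers : List String) : List (String × String) :=
  let aliases := engineFieldAliases
  (headers.foldl (fun suggestions header => suggestFieldLoop header aliases suggestions aliases.items)
    PySem.Dict.empty).items

-- ===== PORT B =====
-- helper _clean of Source B
def cleanForm (s : String) : String :=
  PySem.Str.replace (PySem.Str.replace (PySem.Str.replace s "#" "") "-" " ") "_" " "

-- the table-building loop of Source B: (raw, cleaned)
def buildTables : PySem.Dict String (Int × String) × PySem.Dict String (Int × String) :=
  (PySem.List.enumerate engineFieldAliases.items 0).foldl
    (fun rc p =>
      let i := p.1
      let field := p.2.1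
      let field_aliases := p.2.2
      let raw0 := rc.1.setdefault (PySem.Str.lower field) (i, field)
      field_aliases.foldl
        (fun rc a =>
          let al := PySem.Str.lower a
          (rc.1.setdefault al (i, field), rc.2.setdefault (cleanForm al) (i, field)))
        (raw0, rc.2))
    (PySem.Dict.empty, PySem.Dict.empty)

-- the 'for c in (p, q): if c is not None and (best is None or c[0] < best[0])' selection of Source B
def bestOf (cands : List (Option (Int × String))) : Option (Int × String) :=
  cands.foldl
    (fun best c =>
      match c with
      | none => best
      | some p =>
        match best with
        | none => some p
        | some b => if p.1 < b.1 then some p else best)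
    none

def suggest_engine_field_mappings_alt (headers : List String) : List (String × String) :=
  let tables := buildTables
  (headers.foldl
    (fun suggestions header =>
      let hl := PySem.Str.strip (PySem.Str.lower header)
      match bestOf [tables.1.get? hl, tables.2.get? (cleanForm hl)] with
      | none => suggestions
      | some b => suggestions.insert b.2 header)
    PySem.Dict.empty).items

-- ===== PRECONDITION & SPEC =====
def Spec_suggest_engine_field_mappings (headers : List String) (out : List (String × String)) : Prop := out = suggest_engine_field_mappings_alt headers
instance (headers : List String) (out : List (String × String)) : Decidable (Spec_suggest_engine_field_mappings headers out) := by unfold Spec_suggest_engine_field_mappings; infer_instance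

-- ===== CLAIM (what is proved, stated in full; the proofs are below) =====
def Claim_equal_suggest_engine_field_mappings : Prop := ∀ (headers : List String), Dom_suggest_engine_field_mappings headers → Spec_suggest_engine_field_mappings headers (suggest_engine_field_mappings headers)

-- ===== LEMMAS AND PROOFS =====

-- the normalized key sets of one field entry
def pvRawKeys (e : String × List String) : List String :=
  PySem.Str.lower e.1 :: e.2.map PySem.Str.lower
def pvCleanKeys (e : String × List String) : List String :=
  e.2.map (fun a => cleanForm (PySem.Str.lower a))

-- first-match association lookup
def pvLk (q : String) : List (String × (Int × String)) → Option (Int × String)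
  | [] => none
  | (k, v) :: rest => if q = k then some v else pvLk q rest

def pvFlatRaw (E : List (Int × (String × List String))) : List (String × (Int × String)) :=
  E.flatMap (fun p => (pvRawKeys p.2).map (fun k => (k, (p.1, p.2.1))))
def pvFlatClean (E : List (Int × (String × List String))) : List (String × (Int × String)) :=
  E.flatMap (fun p => (pvCleanKeys p.2).map (fun k => (k, (p.1, p.2.1))))

def pvRawHit (hl : String) : List (Int × (String × List String)) → Option (Int × String)
  | [] => none
  | (i, e) :: rest => if (pvRawKeys e).contains hl then some (i, e.1) else pvRawHit hl rest
def pvCleanHit (hc : String) : List (Int × (String × List String)) → Option (Int × String)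
  | [] => none
  | (i, e) :: rest => if (pvCleanKeys e).contains hc then some (i, e.1) else pvCleanHit hc rest
def pvFirstBoth (hl hc : String) : List (Int × (String × List String)) → Option (Int × String)
  | [] => none
  | (i, e) :: rest =>
    if (pvRawKeys e).contains hl || (pvCleanKeys e).contains hc then some (i, e.1)
    else pvFirstBoth hl hc rest
def pvFirstField (hl hc : String) : List (String × List String) → Option String
  | [] => none
  | e :: rest =>
    if (pvRawKeys e).contains hl || (pvCleanKeys e).contains hc then some e.1
    else pvFirstField hl hc rest

def pvCombine (p q : Option (Int × String)) : Option (Int × String) :=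
  match p, q with
  | none, none => none
  | some p, none => some p
  | none, some q => some q
  | some p, some q => if q.1 < p.1 then some q else some p

theorem bestOf_pair (p q : Option (Int × String)) : bestOf [p, q] = pvCombine p q := by
  cases p <;> cases q <;> simp [bestOf, pvCombine]


theorem pvLk_append (q : String) (xs ys : List (String × (Int × String))) :
    pvLk q (xs ++ ys) = Option.or (pvLk q xs) (pvLk q ys) := by
  induction xs with
  | nil => simp [pvLk]
  | cons p rest ih => obtain ⟨k, v⟩ := p; by_cases h : q = k <;> simp [pvLk, h, ih]

theorem pvLk_map_const (q : String) (ks : List String) (v : Int × String) :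
    pvLk q (ks.map (fun k => (k, v))) = if ks.contains q then some v else none := by
  induction ks with
  | nil => simp [pvLk]
  | cons k rest ih =>
    by_cases h : q = k
    · subst h; simp [pvLk]
    · simp [pvLk, h, ih]

theorem get?_setdefault' (d : PySem.Dict String (Int × String)) (k : String) (v : Int × String) (q : String) :
    (d.setdefault k v).get? q = Option.or (d.get? q) (if q = k then some v else none) := by
  by_cases h : q = k
  · subst h
    rw [PySem.Dict.get?_setdefault_self]
    cases hd : d.get? q <;> simp [Option.or]
  · rw [PySem.Dict.get?_setdefault_of_ne d v h]
    cases hd : d.get? q <;> simp [h, Option.or]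

def pvInnerStep (i : Int) (f : String)
    (rc : PySem.Dict String (Int × String) × PySem.Dict String (Int × String)) (a : String) :
    PySem.Dict String (Int × String) × PySem.Dict String (Int × String) :=
  (rc.1.setdefault (PySem.Str.lower a) (i, f), rc.2.setdefault (cleanForm (PySem.Str.lower a)) (i, f))

def pvOuterStep (rc : PySem.Dict String (Int × String) × PySem.Dict String (Int × String))
    (p : Int × (String × List String)) :
    PySem.Dict String (Int × String) × PySem.Dict String (Int × String) :=
  p.2.2.foldl (pvInnerStep p.1 p.2.1) (rc.1.setdefault (PySem.Str.lower p.2.1) (p.1, p.2.1), rc.2)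

theorem buildTables_eq :
    buildTables = (PySem.List.enumerate engineFieldAliases.items 0).foldl pvOuterStep
      (PySem.Dict.empty, PySem.Dict.empty) := rfl

set_option maxHeartbeats 1000000 in
theorem inner_fold_get (als : List String) (i : Int) (f : String)
    (rc : PySem.Dict String (Int × String) × PySem.Dict String (Int × String)) (q : String) :
    ((als.foldl (pvInnerStep i f) rc).1.get? q
      = Option.or (rc.1.get? q) (pvLk q (als.map (fun a => (PySem.Str.lower a, (i, f))))))
    ∧ ((als.foldl (pvInnerStep i f) rc).2.get? q
      = Option.or (rc.2.get? q) (pvLk q (als.map (fun a => (cleanForm (PySem.Str.lower a), (i, f)))))) := by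
  induction als generalizing rc with
  | nil => simp [pvLk]
  | cons a rest ih =>
    simp only [List.foldl_cons, List.map_cons, pvLk]
    obtain ⟨ih1, ih2⟩ := ih (pvInnerStep i f rc a)
    constructor
    · rw [ih1, show (pvInnerStep i f rc a).1 = rc.1.setdefault (PySem.Str.lower a) (i, f) from rfl,
        get?_setdefault', Option.or_assoc]
      by_cases h : q = PySem.Str.lower a <;> simp [h, Option.some_or, Option.none_or]
    · rw [ih2, show (pvInnerStep i f rc a).2 = rc.2.setdefault (cleanForm (PySem.Str.lower a)) (i, f) from rfl,
        get?_setdefault', Option.or_assoc]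
      by_cases h : q = cleanForm (PySem.Str.lower a) <;> simp [h, Option.some_or, Option.none_or]

theorem build_fold_get (E : List (Int × (String × List String)))
    (rc : PySem.Dict String (Int × String) × PySem.Dict String (Int × String)) (q : String) :
    ((E.foldl pvOuterStep rc).1.get? q = Option.or (rc.1.get? q) (pvLk q (pvFlatRaw E)))
    ∧ ((E.foldl pvOuterStep rc).2.get? q = Option.or (rc.2.get? q) (pvLk q (pvFlatClean E))) := by
  induction E generalizing rc with
  | nil => simp [pvFlatRaw, pvFlatClean, pvLk]
  | cons p rest ih =>
    obtain ⟨i, f, als⟩ := p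
    simp only [List.foldl_cons]
    obtain ⟨ih1, ih2⟩ := ih (pvOuterStep rc (i, f, als))
    obtain ⟨in1, in2⟩ := inner_fold_get als i f
      (rc.1.setdefault (PySem.Str.lower f) (i, f), rc.2) q
    constructor
    · rw [ih1, show pvOuterStep rc (i, f, als)
          = als.foldl (pvInnerStep i f) (rc.1.setdefault (PySem.Str.lower f) (i, f), rc.2) from rfl,
        in1, get?_setdefault', Option.or_assoc, Option.or_assoc,
        show pvFlatRaw ((i, f, als) :: rest)
          = (pvRawKeys (f, als)).map (fun k => (k, (i, f))) ++ pvFlatRaw rest from rfl,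
        pvLk_append,
        show (pvRawKeys (f, als)).map (fun k => (k, (i, f)))
          = (PySem.Str.lower f, (i, f)) :: als.map (fun a => (PySem.Str.lower a, (i, f))) from by
            simp [pvRawKeys, List.map_map, Function.comp_def]]
      by_cases hq : q = PySem.Str.lower f <;>
        simp [pvLk, hq, Option.some_or, Option.none_or]
    · rw [ih2, show pvOuterStep rc (i, f, als)
          = als.foldl (pvInnerStep i f) (rc.1.setdefault (PySem.Str.lower f) (i, f), rc.2) from rfl, in2,
        show pvFlatClean ((i, f, als) :: rest)
          = (pvCleanKeys (f, als)).map (fun k => (k, (i, f))) ++ pvFlatClean rest from rfl,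
        pvLk_append,
        show (pvCleanKeys (f, als)).map (fun k => (k, (i, f)))
          = als.map (fun a => (cleanForm (PySem.Str.lower a), (i, f))) from by
            simp [pvCleanKeys, List.map_map, Function.comp_def],
        Option.or_assoc]

theorem pvLk_flatRaw (hl : String) (E : List (Int × (String × List String))) :
    pvLk hl (pvFlatRaw E) = pvRawHit hl E := by
  induction E with
  | nil => rfl
  | cons p rest ih =>
    obtain ⟨i, e⟩ := p
    rw [show pvFlatRaw ((i, e) :: rest)
        = (pvRawKeys e).map (fun k => (k, (i, e.1))) ++ pvFlatRaw rest from rfl,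
      pvLk_append, pvLk_map_const, ih]
    by_cases h : hl ∈ pvRawKeys e <;> simp [pvRawHit, List.contains_eq_mem, h]

theorem pvLk_flatClean (hc : String) (E : List (Int × (String × List String))) :
    pvLk hc (pvFlatClean E) = pvCleanHit hc E := by
  induction E with
  | nil => rfl
  | cons p rest ih =>
    obtain ⟨i, e⟩ := p
    rw [show pvFlatClean ((i, e) :: rest)
        = (pvCleanKeys e).map (fun k => (k, (i, e.1))) ++ pvFlatClean rest from rfl,
      pvLk_append, pvLk_map_const, ih]
    by_cases h : hc ∈ pvCleanKeys e <;> simp [pvCleanHit, List.contains_eq_mem, h]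

theorem pvRawHit_mem (hl : String) (E : List (Int × (String × List String)))
    {j : Int} {g : String} (h : pvRawHit hl E = some (j, g)) : j ∈ E.map (·.1) := by
  induction E with
  | nil => simp [pvRawHit] at h
  | cons p rest ih =>
    obtain ⟨i, e⟩ := p
    by_cases hc : hl ∈ pvRawKeys e <;>
      simp [pvRawHit, List.contains_eq_mem, hc, Prod.ext_iff] at h
    · simp [h.1]
    · simp [ih h]

theorem pvCleanHit_mem (hc' : String) (E : List (Int × (String × List String)))
    {j : Int} {g : String} (h : pvCleanHit hc' E = some (j, g)) : j ∈ E.map (·.1) := by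
  induction E with
  | nil => simp [pvCleanHit] at h
  | cons p rest ih =>
    obtain ⟨i, e⟩ := p
    by_cases hc : hc' ∈ pvCleanKeys e <;>
      simp [pvCleanHit, List.contains_eq_mem, hc, Prod.ext_iff] at h
    · simp [h.1]
    · simp [ih h]

theorem pvCombine_hits (hl hc : String) :
    ∀ E : List (Int × (String × List String)), E.Pairwise (fun p q => p.1 < q.1) →
      pvCombine (pvRawHit hl E) (pvCleanHit hc E) = pvFirstBoth hl hc E := by
  intro E
  induction E with
  | nil => intro _; rfl
  | cons p rest ih =>
    intro hE
    obtain ⟨i, e⟩ := p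
    rw [List.pairwise_cons] at hE
    have hlt : ∀ j ∈ rest.map (·.1), i < j := by
      intro j hj
      obtain ⟨a, ha, rfl⟩ := List.mem_map.1 hj
      exact hE.1 a ha
    simp only [pvRawHit, pvCleanHit, pvFirstBoth]
    by_cases h1 : (pvRawKeys e).contains hl <;> by_cases h2 : (pvCleanKeys e).contains hc <;>
      simp only [h1, h2, Bool.true_or, Bool.false_or, Bool.or_self, if_true, if_false]
    · simp [pvCombine]
    · cases hq : pvCleanHit hc rest with
      | none => rfl
      | some b =>
        obtain ⟨j, g⟩ := b
        have hij : i < j := hlt j (pvCleanHit_mem hc rest hq)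
        have : ¬ (j < i) := not_lt.2 hij.le
        simp [pvCombine, this]
    · cases hq : pvRawHit hl rest with
      | none => rfl
      | some b =>
        obtain ⟨j, g⟩ := b
        have hij : i < j := hlt j (pvRawHit_mem hl rest hq)
        simp [pvCombine, hij]
    · exact ih hE.2

theorem pvFirstBoth_enumerate (hl hc : String) (L : List (String × List String)) (s : Int) :
    (pvFirstBoth hl hc (PySem.List.enumerate L s)).map (·.2) = pvFirstField hl hc L := by
  induction L generalizing s with
  | nil => rfl
  | cons e rest ih =>
    rw [PySem.List.enumerate_cons]
    by_cases h : hl ∈ pvRawKeys e ∨ hc ∈ pvCleanKeys e <;>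
      simp [pvFirstBoth, pvFirstField, List.contains_eq_mem, h, ih]

theorem fuzzyAliasLoop_eq (hl : String) (als : List String) :
    fuzzyAliasLoop hl als
      = ((als.map PySem.Str.lower).contains hl
          || (als.map (fun a => cleanForm (PySem.Str.lower a))).contains (cleanForm hl)) := by
  induction als with
  | nil => rfl
  | cons a rest ih =>
    have hA : PySem.Str.replace (PySem.Str.replace (PySem.Str.replace (PySem.Str.lower a) "#" "") "-" " ") "_" " "
        = cleanForm (PySem.Str.lower a) := rfl
    have hH : PySem.Str.replace (PySem.Str.replace (PySem.Str.replace hl "#" "") "-" " ") "_" " "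
        = cleanForm hl := rfl
    simp only [fuzzyAliasLoop, hA, hH]
    by_cases h1 : hl = PySem.Str.lower a
    · simp [h1]
    · by_cases h2 : cleanForm (PySem.Str.lower a) = cleanForm hl
      · have h2' : cleanForm hl = cleanForm (PySem.Str.lower a) := h2.symm
        simp [h1, h2']
      · have h2' : ¬ cleanForm hl = cleanForm (PySem.Str.lower a) := fun h => h2 h.symm
        simp [h1, h2, h2', ih]

theorem fuzzy_eq (h f : String) (als : List String)
    (hget : engineFieldAliases.get? f = some als) :
    fuzzy_match_header h f engineFieldAliases
      = ((pvRawKeys (f, als)).contains (PySem.Str.strip (PySem.Str.lower h))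
          || (pvCleanKeys (f, als)).contains (cleanForm (PySem.Str.strip (PySem.Str.lower h)))) := by
  have hcont : engineFieldAliases.contains f = true := by
    rw [PySem.Dict.contains_eq_isSome_get?, hget]; rfl
  have hgetD : engineFieldAliases.getD f [] = als := PySem.Dict.getD_of_get?_eq_some _ _ hget
  by_cases h1 : PySem.Str.strip (PySem.Str.lower h) = PySem.Str.lower f
  · simp [fuzzy_match_header, pvRawKeys, h1]
  · simp [fuzzy_match_header, h1, hcont, hgetD, fuzzyAliasLoop_eq, pvRawKeys, pvCleanKeys]

theorem items_get :
    ∀ p ∈ engineFieldAliases.items, engineFieldAliases.get? p.1 = some p.2 := by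
  intro p hp
  obtain ⟨k, v⟩ := p
  exact PySem.Dict.get?_of_mem_items _ hp (PySem.Dict.nodup_keys_ofList _)

theorem suggestFieldLoop_eq (h : String) (sug : PySem.Dict String String)
    (L : List (String × List String))
    (hd : ∀ p ∈ L, engineFieldAliases.get? p.1 = some p.2) :
    suggestFieldLoop h engineFieldAliases sug L
      = match pvFirstField (PySem.Str.strip (PySem.Str.lower h))
          (cleanForm (PySem.Str.strip (PySem.Str.lower h))) L with
        | none => sug
        | some f => sug.insert f h := by
  induction L with
  | nil => rfl
  | cons e rest ih =>
    obtain ⟨f, als⟩ := e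
    have hget := hd (f, als) (List.mem_cons_self ..)
    have hrest := fun p hp => hd p (List.mem_cons_of_mem _ hp)
    by_cases hcase : PySem.Str.strip (PySem.Str.lower h) ∈ pvRawKeys (f, als)
        ∨ cleanForm (PySem.Str.strip (PySem.Str.lower h)) ∈ pvCleanKeys (f, als) <;>
      simp [suggestFieldLoop, fuzzy_eq h f als hget, pvFirstField, List.contains_eq_mem,
        hcase, ih hrest]

theorem step_eq (sug : PySem.Dict String String) (h : String) :
    suggestFieldLoop h engineFieldAliases sug engineFieldAliases.items
      = (match bestOf [buildTables.1.get? (PySem.Str.strip (PySem.Str.lower h)),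
            buildTables.2.get? (cleanForm (PySem.Str.strip (PySem.Str.lower h)))] with
         | none => sug
         | some b => sug.insert b.2 h) := by
  have hraw := (build_fold_get (PySem.List.enumerate engineFieldAliases.items 0)
    (PySem.Dict.empty, PySem.Dict.empty) (PySem.Str.strip (PySem.Str.lower h))).1
  have hclean := (build_fold_get (PySem.List.enumerate engineFieldAliases.items 0)
    (PySem.Dict.empty, PySem.Dict.empty) (cleanForm (PySem.Str.strip (PySem.Str.lower h)))).2
  rw [buildTables_eq, bestOf_pair, hraw, hclean]
  simp only [PySem.Dict.get?_empty, Option.or, pvLk_flatRaw, pvLk_flatClean]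
  rw [pvCombine_hits _ _ _ (PySem.List.pairwise_lt_enumerate _ _),
    suggestFieldLoop_eq h sug _ items_get]
  rw [← pvFirstBoth_enumerate (PySem.Str.strip (PySem.Str.lower h))
    (cleanForm (PySem.Str.strip (PySem.Str.lower h))) engineFieldAliases.items 0]
  cases pvFirstBoth (PySem.Str.strip (PySem.Str.lower h))
    (cleanForm (PySem.Str.strip (PySem.Str.lower h)))
    (PySem.List.enumerate engineFieldAliases.items 0) <;> simp

-- ===== VERDICT (by name: the statement is the Claim_ definition above) =====
theorem suggest_engine_field_mappings_spec : Claim_equal_suggest_engine_field_mappings := by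
  intro headers _
  unfold Spec_suggest_engine_field_mappings suggest_engine_field_mappings suggest_engine_field_mappings_alt
  exact congrArg PySem.Dict.items (List.foldl_ext _ _ _ (fun sug h _ => step_eq sug h))
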